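-- pv_equiv track=rewrite | github.com/KeithLamb72/PythonScript-Json | json_parser.py | sort_urls_by_relevance
-- ===== SOURCE A (Python) =====
-- from collections import defaultdict
--
-- def sort_urls_by_relevance(urls, keywords=None):
--     """
--     Sorts the list of URLs based on a relevance score.
--     The score is based on the occurrence of keywords.
--     By default the keywords list includes terms that might appear in Maps, Flights, Hotels, etc.
--     """
--     if keywords is None:
--         keywords = ["maps", "flights", "hotels", "booking", "price", "search", "showtimes"]
--     url_relevance = defaultdict(list)
--     for url in urls:
--         # Count how many keywords appear in the URL (case-insensitive)
--         score = sum(1 for keyword in keywords if keyword in url.lower())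
--         url_relevance[score].append(url)
--     sorted_urls = []
--     for score in sorted(url_relevance.keys(), reverse=True):
--         sorted_urls.extend(url_relevance[score])
--     return sorted_urls
-- ===== SOURCE B (Python) =====
-- def sort_urls_by_relevance(urls, keywords=None):
--     """Sorts URLs by descending keyword-match count using one stable sort."""
--     if keywords is None:
--         keywords = ["maps", "flights", "hotels", "booking", "price", "search", "showtimes"]
--     return sorted(
--         urls,
--         key=lambda url: sum(1 for keyword in keywords if keyword in url.lower()),
--         reverse=True,
--     )
-- ===== Notes on version B (the rewrite author's own statement) =====
-- stated objective: idiomatic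
-- what changed: Replaced the defaultdict score-bucketing plus sorted-keys concatenation with a single stable sorted(urls, key=score, reverse=True) call, relying on sort stability to reproduce the bucket append order.
import Mathlib
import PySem

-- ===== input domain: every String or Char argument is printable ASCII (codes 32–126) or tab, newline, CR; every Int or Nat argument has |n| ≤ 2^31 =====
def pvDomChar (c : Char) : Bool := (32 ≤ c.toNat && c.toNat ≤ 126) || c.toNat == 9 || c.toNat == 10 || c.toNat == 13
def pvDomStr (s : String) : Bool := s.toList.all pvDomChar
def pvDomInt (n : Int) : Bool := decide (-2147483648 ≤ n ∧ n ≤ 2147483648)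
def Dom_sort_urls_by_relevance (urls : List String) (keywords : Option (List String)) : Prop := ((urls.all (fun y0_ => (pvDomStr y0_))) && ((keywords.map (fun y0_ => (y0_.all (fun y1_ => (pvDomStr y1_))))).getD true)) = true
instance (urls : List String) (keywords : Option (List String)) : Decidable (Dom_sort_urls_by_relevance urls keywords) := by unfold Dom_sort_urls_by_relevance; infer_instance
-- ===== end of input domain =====

-- B replaces A's defaultdict score-bucketing + sorted-keys concatenation with one stable reverse sort keyed by the score (idiomatic; same asymptotic cost).


-- ===== PORT A =====
-- score = sum(1 for keyword in keywords if keyword in url.lower())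
def pvScore (kws : List String) (url : String) : Int :=
  (kws.map (fun keyword => if PySem.Str.isIn keyword (PySem.Str.lower url) then (1 : Int) else 0)).sum

def sort_urls_by_relevance (urls : List String) (keywords : Option (List String)) : List String :=
  let kws := keywords.getD ["maps", "flights", "hotels", "booking", "price", "search", "showtimes"]
  -- url_relevance[score].append(url) on a defaultdict(list) is Dict.modify with default []
  let url_relevance : PySem.Dict Int (List String) :=
    urls.foldl (fun d url => d.modify (pvScore kws url) [] (fun l => l ++ [url])) PySem.Dict.empty
  -- for score in sorted(url_relevance.keys(), reverse=True): sorted_urls.extend(url_relevance[score])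
  (PySem.List.sorted url_relevance.keys (fun x => x) true).foldl
    (fun acc s => acc ++ url_relevance.getD s []) []

-- ===== PORT B =====
def sort_urls_by_relevance_alt (urls : List String) (keywords : Option (List String)) : List String :=
  let kws := keywords.getD ["maps", "flights", "hotels", "booking", "price", "search", "showtimes"]
  PySem.List.sorted urls (fun url => pvScore kws url) true

-- ===== PRECONDITION & SPEC =====
def Spec_sort_urls_by_relevance (urls : List String) (keywords : Option (List String)) (out : List String) : Prop := out = sort_urls_by_relevance_alt urls keywords
instance (urls : List String) (keywords : Option (List String)) (out : List String) : Decidable (Spec_sort_urls_by_relevance urls keywords out) := by unfold Spec_sort_urls_by_relevance; infer_instance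

-- ===== CLAIM (what is proved, stated in full; the proofs are below) =====
def Claim_equal_sort_urls_by_relevance : Prop := ∀ (urls : List String) (keywords : Option (List String)), Dom_sort_urls_by_relevance urls keywords → Spec_sort_urls_by_relevance urls keywords (sort_urls_by_relevance urls keywords)

-- ===== LEMMAS AND PROOFS =====

-- insertBy drops x right after a prefix it does not go before and right before a suffix it goes before
lemma pv_insertBy_split {α : Type} (bef : α → α → Bool) (x : α) (A B : List α)
    (hA : ∀ y ∈ A, bef x y = false) (hB : ∀ y ∈ B, bef x y = true) :
    PySem.List.insertBy bef x (A ++ B) = A ++ x :: B := by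
  induction A with
  | nil =>
    cases B with
    | nil => rfl
    | cons b B => simp [PySem.List.insertBy, hB b (by simp)]
  | cons a A ih =>
    simp only [List.cons_append, PySem.List.insertBy, hA a (by simp)]
    simp only [Bool.false_eq_true, if_false, List.cons.injEq, true_and]
    exact ih (fun y hy => hA y (by simp [hy]))

-- appending one element to the list being reverse-sorted is one stable insertion
lemma pv_sorted_rev_snoc {α : Type} (xs : List α) (x : α) (key : α → Int) :
    PySem.List.sorted (xs ++ [x]) key true =
      PySem.List.insertBy (fun a b => decide (key b < key a)) x (PySem.List.sorted xs key true) := by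
  rw [PySem.List.sorted_rev_eq_foldl_insertBy, PySem.List.sorted_rev_eq_foldl_insertBy,
    List.foldl_append]
  rfl

lemma pv_ofList_snoc {α : Type} [BEq α] (l : List α) (a : α) :
    PySem.Set.ofList (l ++ [a]) = PySem.Set.add (PySem.Set.ofList l) a := by
  rw [PySem.Set.ofList_eq_foldl, PySem.Set.ofList_eq_foldl, List.foldl_append]
  rfl

-- the reverse-sorted distinct score list is strictly decreasing
lemma pv_K_pairwise (S : List Int) (h : S.Nodup) :
    (PySem.List.sorted S (fun x => x) true).Pairwise (fun a b => b < a) := by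
  have h1 := PySem.List.sorted_pairwise_rev S (fun x => x)
  have h2 : (PySem.List.sorted S (fun x => x) true).Nodup :=
    (PySem.List.sorted_perm S (fun x => x) true).nodup_iff.mpr h
  exact (h1.and h2).imp (fun {a b} hab => lt_of_le_of_ne hab.1 (Ne.symm hab.2))

lemma pv_key_of_mem_filter {key : String → Int} {xs : List String} {s : Int} {y : String}
    (hy : y ∈ xs.filter (fun u => key u == s)) : key y = s := by
  have := (List.mem_filter.mp hy).2
  simpa using this

lemma pv_flatMap_congr {α β : Type} {l : List α} {f g : α → List β}
    (h : ∀ a ∈ l, f a = g a) : l.flatMap f = l.flatMap g := by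
  induction l with
  | nil => rfl
  | cons a l ih =>
    simp only [List.flatMap_cons, h a (by simp), ih (fun a ha => h a (by simp [ha]))]


lemma pv_filter_snoc_ne (key : String → Int) (xs : List String) (x : String) (s : Int)
    (h : ¬ key x = s) :
    (xs ++ [x]).filter (fun u => key u == s) = xs.filter (fun u => key u == s) := by
  simp [List.filter_append, h]

lemma pv_filter_snoc_eq (key : String → Int) (xs : List String) (x : String) :
    (xs ++ [x]).filter (fun u => key u == key x) = xs.filter (fun u => key u == key x) ++ [x] := by
  simp [List.filter_append]

lemma pv_dropWhile_head_false {α : Type} (p : α → Bool) :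
    ∀ (l : List α) (h : α) (t : List α), l.dropWhile p = h :: t → p h = false := by
  intro l
  induction l with
  | nil => intro h t he; simp [List.dropWhile] at he
  | cons a l ih =>
    intro h t he
    by_cases hp : p a
    · rw [List.dropWhile_cons_of_pos hp] at he
      exact ih _ _ he
    · rw [List.dropWhile_cons_of_neg hp] at he
      cases he
      simpa using hp

-- MAIN: a stable reverse sort by key equals the concatenation, over the distinct key values
-- in decreasing order, of the sublists of elements having each key value.
lemma pv_main (key : String → Int) (urls : List String) :
    PySem.List.sorted urls key true =
      (PySem.List.sorted (PySem.Set.ofList (urls.map key)) (fun x => x) true).flatMap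
        (fun s => urls.filter (fun u => key u == s)) := by
  induction urls using List.reverseRecOn with
  | nil => rfl
  | append_singleton xs x ih =>
    set S := PySem.Set.ofList (xs.map key) with hS
    set K := PySem.List.sorted S (fun x => x) true with hK
    have hSnd : S.Nodup := PySem.Set.nodup_ofList _
    have hKp : K.Pairwise (fun a b => b < a) := pv_K_pairwise S hSnd
    have hKmem : ∀ s, s ∈ K ↔ s ∈ S := fun s => PySem.List.mem_sorted S (fun x => x) true s
    have hfilt : ∀ s : Int, (xs ++ [x]).filter (fun u => key u == s) =
        xs.filter (fun u => key u == s) ++ if key x == s then [x] else [] := by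
      intro s; simp [List.filter_append, List.filter_cons]
    rw [pv_sorted_rev_snoc, ih, List.map_append, List.map_cons, List.map_nil, pv_ofList_snoc]
    by_cases hmem : key x ∈ S
    · -- existing score: key list unchanged, bucket of (key x) gains x at its end
      have hadd : PySem.Set.add S (key x) = S := by
        simp only [PySem.Set.add]
        rw [if_pos ((PySem.Set.contains_iff _ _).mpr hmem)]
      rw [hadd, ← hK]
      obtain ⟨K1, K2, hKsplit⟩ := List.append_of_mem ((hKmem (key x)).mpr hmem)
      rw [hKsplit]
      have hp := hKsplit ▸ hKp
      rw [List.pairwise_append] at hp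
      have hK1gt : ∀ s ∈ K1, key x < s := fun s hs => hp.2.2 s hs (key x) (by simp)
      have hK2lt : ∀ s ∈ K2, s < key x := fun s hs => (List.pairwise_cons.mp hp.2.1).1 s hs
      simp only [List.flatMap_append, List.flatMap_cons]
      rw [← List.append_assoc, ← List.append_assoc]
      rw [pv_insertBy_split (A := K1.flatMap (fun s => xs.filter (fun u => key u == s)) ++
            xs.filter (fun u => key u == key x))
          (B := K2.flatMap (fun s => xs.filter (fun u => key u == s)))]
      · have e1 : K1.flatMap (fun s => (xs ++ [x]).filter (fun u => key u == s)) =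
            K1.flatMap (fun s => xs.filter (fun u => key u == s)) :=
          pv_flatMap_congr (fun s hs =>
            pv_filter_snoc_ne key xs x s (by have := hK1gt s hs; omega))
        have e2 : K2.flatMap (fun s => (xs ++ [x]).filter (fun u => key u == s)) =
            K2.flatMap (fun s => xs.filter (fun u => key u == s)) :=
          pv_flatMap_congr (fun s hs =>
            pv_filter_snoc_ne key xs x s (by have := hK2lt s hs; omega))
        rw [e1, e2, pv_filter_snoc_eq]
        simp
      · intro y hy
        rcases List.mem_append.mp hy with hy | hy
        · obtain ⟨s, hs, hy⟩ := List.mem_flatMap.mp hy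
          have := pv_key_of_mem_filter hy
          have := hK1gt s hs
          simp; omega
        · have := pv_key_of_mem_filter hy
          simp; omega
      · intro y hy
        obtain ⟨s, hs, hy⟩ := List.mem_flatMap.mp hy
        have := pv_key_of_mem_filter hy
        have := hK2lt s hs
        simp; omega
    · -- new score: it is inserted among the keys; its bucket is exactly [x]
      have hadd : PySem.Set.add S (key x) = S ++ [key x] := by
        simp only [PySem.Set.add]
        rw [if_neg]
        simp only [PySem.Set.contains_eq_listContains]
        simpa using fun h => hmem (by simpa using h)
      rw [hadd, pv_sorted_rev_snoc, ← hK]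
      set K1 := K.takeWhile (fun y => !decide (y < key x)) with hK1
      set K2 := K.dropWhile (fun y => !decide (y < key x)) with hK2
      have hKsplit : K = K1 ++ K2 := (List.takeWhile_append_dropWhile).symm
      have hK1f : ∀ s ∈ K1, ¬ s < key x := by
        intro s hs
        have := List.mem_takeWhile_imp hs
        simpa using this
      have hK2lt : ∀ s ∈ K2, s < key x := by
        intro s hs
        have hp2 : K2.Pairwise (fun a b => b < a) := List.Pairwise.sublist (List.dropWhile_sublist _) hKp
        cases hcase : K2 with
        | nil => rw [hcase] at hs; simp at hs
        | cons h2 t2 =>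
          have hhead : h2 < key x := by
            have := pv_dropWhile_head_false (fun y => !decide (y < key x)) K h2 t2
              (hK2.symm.trans hcase)
            simpa using this
          rw [hcase] at hs
          rcases List.mem_cons.mp hs with rfl | hs
          · exact hhead
          · have := (List.pairwise_cons.mp (hcase ▸ hp2)).1 s hs
            omega
      have hkeys : PySem.List.insertBy (fun a b => decide (b < a)) (key x) K = K1 ++ key x :: K2 := by
        rw [hKsplit]
        exact pv_insertBy_split _ _ _ _
          (fun y hy => by have := hK1f y hy; simpa using this)
          (fun y hy => by have := hK2lt y hy; simpa using this)
      rw [hkeys, hKsplit]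
      simp only [List.flatMap_append, List.flatMap_cons]
      have hnotin : ∀ u ∈ xs, ¬ key u = key x := by
        intro u hu h
        exact hmem (by rw [hS, PySem.Set.mem_ofList]; exact h ▸ List.mem_map_of_mem hu)
      have hbucket : (xs ++ [x]).filter (fun u => key u == key x) = [x] := by
        rw [hfilt]
        rw [List.filter_eq_nil_iff.mpr (fun u hu => by simpa using hnotin u hu)]
        simp
      rw [pv_insertBy_split (A := K1.flatMap (fun s => xs.filter (fun u => key u == s)))
          (B := K2.flatMap (fun s => xs.filter (fun u => key u == s)))]
      · have e1 : K1.flatMap (fun s => (xs ++ [x]).filter (fun u => key u == s)) =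
            K1.flatMap (fun s => xs.filter (fun u => key u == s)) :=
          pv_flatMap_congr (fun s hs => pv_filter_snoc_ne key xs x s (by
            have h1 : s ∈ S := (hKmem s).mp (hKsplit ▸ List.mem_append_left _ hs)
            exact fun h => hmem (h ▸ h1)))
        have e2 : K2.flatMap (fun s => (xs ++ [x]).filter (fun u => key u == s)) =
            K2.flatMap (fun s => xs.filter (fun u => key u == s)) :=
          pv_flatMap_congr (fun s hs => pv_filter_snoc_ne key xs x s (by
            have h1 : s ∈ S := (hKmem s).mp (hKsplit ▸ List.mem_append_right _ hs)
            exact fun h => hmem (h ▸ h1)))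
        rw [e1, e2, hbucket]
        simp
      · intro y hy
        obtain ⟨s, hs, hy⟩ := List.mem_flatMap.mp hy
        have := pv_key_of_mem_filter hy
        have := hK1f s hs
        simp; omega
      · intro y hy
        obtain ⟨s, hs, hy⟩ := List.mem_flatMap.mp hy
        have := pv_key_of_mem_filter hy
        have := hK2lt s hs
        simp; omega

-- A's dict after the grouping loop: keys are the distinct scores in first-occurrence order,
-- each value is the in-order sublist of urls with that score.
lemma pv_dict_keys (key : String → Int) (urls : List String) :
    (urls.foldl (fun d url => d.modify (key url) [] (fun l => l ++ [url]))
      (PySem.Dict.empty : PySem.Dict Int (List String))).keys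
      = PySem.Set.ofList (urls.map key) := by
  rw [PySem.Dict.keys_foldl_modify_key]
  simp [PySem.Set.update, PySem.Set.ofList_eq_foldl]

lemma pv_dict_getD (key : String → Int) (urls : List String) (s : Int) :
    (urls.foldl (fun d url => d.modify (key url) [] (fun l => l ++ [url]))
      (PySem.Dict.empty : PySem.Dict Int (List String))).getD s []
      = urls.filter (fun u => key u == s) := by
  have h : urls.foldl (fun d url => d.modify (key url) [] (fun l => l ++ [url]))
      (PySem.Dict.empty : PySem.Dict Int (List String))
      = (urls.map (fun u => (key u, u))).foldl
          (fun d p => d.modify p.1 [] (fun l => l ++ [p.2])) PySem.Dict.empty := by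
    rw [List.foldl_map]
  rw [h, PySem.Dict.getD_foldl_modify_append]
  simp [List.filter_map, Function.comp_def]

-- ===== VERDICT (by name: the statement is the Claim_ definition above) =====
theorem sort_urls_by_relevance_spec : Claim_equal_sort_urls_by_relevance := by
  intro urls keywords _
  unfold Spec_sort_urls_by_relevance sort_urls_by_relevance sort_urls_by_relevance_alt
  simp only []
  set kws := keywords.getD ["maps", "flights", "hotels", "booking", "price", "search", "showtimes"]
  rw [PySem.List.foldl_append_eq_flatMap, List.nil_append, pv_dict_keys (fun u => pvScore kws u)]
  rw [pv_flatMap_congr (fun s _ => pv_dict_getD (fun u => pvScore kws u) urls s)]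
  exact (pv_main (fun u => pvScore kws u) urls).symm
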